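-- pv_equiv track=rewrite | github.com/felimichalski/TDA-2 | agm/agm.py | filter_bridges
-- ===== SOURCE A (Python) =====
-- def filter_bridges(edges, bridges):
--     normalized_egdes = [(min(u, v), max(u, v), idx) for u, v, idx in edges]
--
--     count = {}
--
--     for u, v, idx in normalized_egdes:
--         edge = (u, v)
--         if edge in count:
--             count[edge].append(idx)
--         else:
--             count[edge] = [idx]
--
--     # Filtramos aquellas combinaciones cuya lista de idx tenga solo un elemento
--     non_repeated_idx = [idx[0] for edge, idx in count.items() if len(idx) == 1]
--
--     return [bridge for bridge in bridges if bridge in non_repeated_idx]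
-- ===== SOURCE B (Python) =====
-- def filter_bridges(edges, bridges):
--     def key(u, v):
--         return (u, v) if u <= v else (v, u)
--     keep = set()
--     for i, (u, v, idx) in enumerate(edges):
--         if not any(j != i and key(a, b) == key(u, v)
--                    for j, (a, b, _) in enumerate(edges)):
--             keep.add(idx)
--     return [b for b in bridges if b in keep]
-- ===== Notes on version B (the rewrite author's own statement) =====
-- stated objective: alternative
-- what changed: Drops A's dict that groups indices per normalized edge entirely: B decides each edge's uniqueness directly by a pairwise scan over the other edges (any j != i with the same normalized pair), accumulates kept indices in a set, and filters bridges by one set lookup instead of a list scan.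
import Mathlib
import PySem

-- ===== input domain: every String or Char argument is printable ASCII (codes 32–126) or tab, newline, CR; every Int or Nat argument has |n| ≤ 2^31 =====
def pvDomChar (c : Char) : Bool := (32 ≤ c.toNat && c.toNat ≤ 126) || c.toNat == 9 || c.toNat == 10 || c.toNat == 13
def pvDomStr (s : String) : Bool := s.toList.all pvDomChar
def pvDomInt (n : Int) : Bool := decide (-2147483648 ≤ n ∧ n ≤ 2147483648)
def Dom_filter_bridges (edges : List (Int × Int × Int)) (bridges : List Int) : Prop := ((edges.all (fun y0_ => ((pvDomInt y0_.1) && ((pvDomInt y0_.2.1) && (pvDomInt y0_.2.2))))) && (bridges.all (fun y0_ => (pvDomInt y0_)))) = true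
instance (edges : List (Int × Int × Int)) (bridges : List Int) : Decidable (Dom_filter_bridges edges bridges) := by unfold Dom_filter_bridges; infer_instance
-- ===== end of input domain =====

-- B drops A's per-edge grouping dict: each edge's uniqueness is decided by a pairwise
-- scan over the other edges and bridges are filtered by a set lookup (objective: alternative).


-- ===== PORT A =====
-- normalized_egdes = [(min(u,v), max(u,v), idx) for u, v, idx in edges]
-- count: dict (u,v) -> list of idx, built with the if-in-append-else-insert loop;
-- non_repeated_idx = [idx[0] for edge, idx in count.items() if len(idx) == 1]
-- (idx[0] on a length-1 list is its head; ported as headD 0, exact since the guard holds);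
-- return [bridge for bridge in bridges if bridge in non_repeated_idx]
def filter_bridges (edges : List (Int × Int × Int)) (bridges : List Int) : List Int :=
  let normalized := edges.map (fun t => (min t.1 t.2.1, max t.1 t.2.1, t.2.2))
  let count : PySem.Dict (Int × Int) (List Int) :=
    normalized.foldl (fun d t =>
      let edge := (t.1, t.2.1)
      if d.contains edge then d.modify edge [] (· ++ [t.2.2])
      else d.insert edge [t.2.2]) PySem.Dict.empty
  let non_repeated_idx :=
    (count.items.filter (fun p => p.2.length == 1)).map (fun p => p.2.headD 0)
  bridges.filter (fun b => non_repeated_idx.contains b)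

-- ===== PORT B =====
-- key(u,v) = (u,v) if u <= v else (v,u); loop over enumerate(edges): keep.add(idx)
-- unless some other position j != i carries the same normalized pair; then
-- [b for b in bridges if b in keep]
def filter_bridges_alt (edges : List (Int × Int × Int)) (bridges : List Int) : List Int :=
  let key := fun (u v : Int) => if u ≤ v then (u, v) else (v, u)
  let en := PySem.List.enumerate edges
  let keep : PySem.Set Int :=
    en.foldl (fun s p =>
      if en.any (fun q => q.1 != p.1 && (key q.2.1 q.2.2.1 == key p.2.1 p.2.2.1)) then s
      else PySem.Set.add s p.2.2.2) PySem.Set.empty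
  bridges.filter (fun b => PySem.Set.contains keep b)

-- ===== PRECONDITION & SPEC =====
def Spec_filter_bridges (edges : List (Int × Int × Int)) (bridges : List Int) (out : List Int) : Prop := out = filter_bridges_alt edges bridges
instance (edges : List (Int × Int × Int)) (bridges : List Int) (out : List Int) : Decidable (Spec_filter_bridges edges bridges out) := by unfold Spec_filter_bridges; infer_instance

-- ===== CLAIM (what is proved, stated in full; the proofs are below) =====
def Claim_equal_filter_bridges : Prop := ∀ (edges : List (Int × Int × Int)) (bridges : List Int), Dom_filter_bridges edges bridges → Spec_filter_bridges edges bridges (filter_bridges edges bridges)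

-- ===== LEMMAS AND PROOFS =====

-- proof-side names for the subterms of the two ports (rfl-equal to them)
def pvKeyOf (t : Int × Int × Int) : Int × Int :=
  if t.1 ≤ t.2.1 then (t.1, t.2.1) else (t.2.1, t.1)

def pvDictA (edges : List (Int × Int × Int)) : PySem.Dict (Int × Int) (List Int) :=
  (edges.map (fun t => (min t.1 t.2.1, max t.1 t.2.1, t.2.2))).foldl
    (fun d t =>
      let edge := (t.1, t.2.1)
      if d.contains edge then d.modify edge [] (· ++ [t.2.2])
      else d.insert edge [t.2.2]) PySem.Dict.empty

def pvNonRep (edges : List (Int × Int × Int)) : List Int :=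
  ((pvDictA edges).items.filter (fun p => p.2.length == 1)).map (fun p => p.2.headD 0)

def pvEn (edges : List (Int × Int × Int)) : List (Int × Int × Int × Int) :=
  PySem.List.enumerate edges

def pvUniq (edges : List (Int × Int × Int)) (p : Int × Int × Int × Int) : Bool :=
  !(pvEn edges).any (fun q => q.1 != p.1 && (pvKeyOf q.2 == pvKeyOf p.2))

def pvKeepB (edges : List (Int × Int × Int)) : PySem.Set Int :=
  (pvEn edges).foldl (fun s p =>
    if (pvEn edges).any (fun q => q.1 != p.1 && (pvKeyOf q.2 == pvKeyOf p.2)) then s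
    else PySem.Set.add s p.2.2.2) PySem.Set.empty

theorem pvKey_min_max (t : Int × Int × Int) :
    (min t.1 t.2.1, max t.1 t.2.1) = pvKeyOf t := by
  unfold pvKeyOf
  rcases t with ⟨u, v, i⟩
  by_cases h : u ≤ v <;> simp [min_def, max_def, h]

theorem pvStepA_eq (d : PySem.Dict (Int × Int) (List Int)) (t : Int × Int × Int) :
    (let edge := (t.1, t.2.1)
     if d.contains edge then d.modify edge [] (· ++ [t.2.2])
     else d.insert edge [t.2.2]) = d.modify (t.1, t.2.1) [] (· ++ [t.2.2]) := by
  by_cases h : d.contains (t.1, t.2.1)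
  · simp [h]
  · simp [h, PySem.Dict.modify,
      PySem.Dict.getD_of_not_contains d [] (by simpa using h)]

theorem pvDictA_eq (edges : List (Int × Int × Int)) :
    pvDictA edges = ((edges.map (fun t => (pvKeyOf t, t.2.2))).foldl
      (fun d p => d.modify p.1 [] (· ++ [p.2])) PySem.Dict.empty) := by
  unfold pvDictA
  rw [List.foldl_map, List.foldl_map]
  refine PySem.List.foldl_congr_mem _ _ _ _ (fun d t _ => ?_)
  simpa [pvKey_min_max t] using pvStepA_eq d (min t.1 t.2.1, max t.1 t.2.1, t.2.2)

theorem pvDictA_getD (edges : List (Int × Int × Int)) (k : Int × Int) :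
    (pvDictA edges).getD k [] = (edges.filter (fun t => pvKeyOf t == k)).map (fun t => t.2.2) := by
  rw [pvDictA_eq, PySem.Dict.getD_foldl_modify_append]
  simp [List.filter_map, Function.comp_def]

theorem pvDictA_keys (edges : List (Int × Int × Int)) :
    (pvDictA edges).keys = PySem.Set.ofList (edges.map pvKeyOf) := by
  rw [pvDictA_eq]
  have := PySem.Dict.keys_foldl_modify_key (edges.map (fun t => (pvKeyOf t, t.2.2)))
    (fun p => p.1) [] (fun (_ : PySem.Dict (Int × Int) (List Int)) (p : (Int × Int) × Int) => (· ++ [p.2])) PySem.Dict.empty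
  simpa [PySem.Set.update, PySem.Set.ofList_eq_foldl, List.map_map, Function.comp_def] using this

theorem pvDictA_nodup (edges : List (Int × Int × Int)) : (pvDictA edges).keys.Nodup := by
  rw [pvDictA_eq]
  exact PySem.Dict.nodup_keys_foldl_modify_key _ (fun p => p.1) [] (fun (_ : PySem.Dict (Int × Int) (List Int)) (p : (Int × Int) × Int) => (· ++ [p.2])) _ (by simp)

-- membership in A's non_repeated_idx list
theorem pvMemA (edges : List (Int × Int × Int)) (b : Int) :
    b ∈ pvNonRep edges ↔
      ∃ k, (edges.filter (fun t => pvKeyOf t == k)).map (fun t => t.2.2) = [b] := by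
  unfold pvNonRep
  rw [PySem.Dict.items_eq_map_keys (pvDictA edges) (pvDictA_nodup edges) []]
  constructor
  · rintro hb
    simp only [List.mem_map, List.mem_filter] at hb
    obtain ⟨p, ⟨⟨k, hk, rfl⟩, hlen⟩, hhead⟩ := hb
    refine ⟨k, ?_⟩
    rw [pvDictA_getD edges k] at hlen hhead
    rcases List.length_eq_one_iff.mp (by simpa using hlen) with ⟨a, ha⟩
    rw [ha] at hhead ⊢
    simpa using hhead
  · rintro ⟨k, hk⟩
    have hkmem : k ∈ (pvDictA edges).keys := by
      rw [pvDictA_keys, PySem.Set.mem_ofList]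
      have hne : edges.filter (fun t => pvKeyOf t == k) ≠ [] := by
        intro h; rw [h] at hk; simp at hk
      rcases List.exists_mem_of_ne_nil _ hne with ⟨t, ht⟩
      exact List.mem_map.mpr ⟨t, (List.mem_filter.mp ht).1,
        by simpa using (List.mem_filter.mp ht).2⟩
    refine List.mem_map.mpr ⟨(k, (pvDictA edges).getD k []),
      List.mem_filter.mpr ⟨List.mem_map.mpr ⟨k, hkmem, rfl⟩, ?_⟩, ?_⟩
    · simp [pvDictA_getD edges k, hk]
    · simp [pvDictA_getD edges k, hk]

-- B side: the conditional-add fold is the set of indices of the unique positions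
theorem pvFoldl_cond_add {α : Type} (l : List (Int × Int × Int × Int))
    (c : Int × Int × Int × Int → Bool) (f : Int × Int × Int × Int → α)
    [DecidableEq α] (s : PySem.Set α) :
    l.foldl (fun s p => if c p then s else PySem.Set.add s (f p)) s
      = PySem.Set.update s ((l.filter (fun p => !c p)).map f) := by
  induction l generalizing s with
  | nil => simp [PySem.Set.update]
  | cons x xs ih =>
    by_cases h : c x <;> simp [h, ih, PySem.Set.update]

theorem pvKeepB_eq (edges : List (Int × Int × Int)) :
    pvKeepB edges
      = PySem.Set.ofList (((pvEn edges).filter (pvUniq edges)).map (fun p => p.2.2.2)) := by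
  unfold pvKeepB
  rw [pvFoldl_cond_add]
  rw [PySem.Set.ofList_eq_foldl]
  rfl

-- positions in enumerate are distinct, hence fst determines the element
theorem pvEn_fst_inj (edges : List (Int × Int × Int))
    {p q : Int × Int × Int × Int} (hp : p ∈ pvEn edges) (hq : q ∈ pvEn edges)
    (h : p.1 = q.1) : p = q := by
  rcases (PySem.List.mem_enumerate_iff _ _ _).mp hp with ⟨i, hi, rfl⟩
  rcases (PySem.List.mem_enumerate_iff _ _ _).mp hq with ⟨j, hj, rfl⟩
  simp only at h
  have : i = j := by omega
  subst this; rfl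

theorem pvEn_nodup (edges : List (Int × Int × Int)) : (pvEn edges).Nodup := by
  have h := PySem.List.pairwise_lt_enumerate (xs := edges) (s := 0)
  exact h.imp (fun hlt => by intro he; rw [he] at hlt; exact lt_irrefl _ hlt)

-- pvUniq p (for p in enumerate) says: p is the only enumerate entry with its key
theorem pvUniq_iff (edges : List (Int × Int × Int)) (p : Int × Int × Int × Int)
    (hp : p ∈ pvEn edges) :
    pvUniq edges p = true ↔ ∀ q ∈ pvEn edges, pvKeyOf q.2 = pvKeyOf p.2 → q = p := by
  unfold pvUniq
  simp only [Bool.not_eq_eq_eq_not, Bool.not_true, List.any_eq_false, Bool.and_eq_true,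
    bne_iff_ne, beq_iff_eq, not_and]
  constructor
  · intro h q hq hk
    by_contra hne
    exact (h q hq) (fun he => hne (pvEn_fst_inj edges hq hp he)) hk
  · intro h q hq hne hk
    exact hne (congrArg Prod.fst (h q hq hk))

-- filtering edges by a key equals mapping snd over filtering enumerate by that key
theorem pvFilter_en (edges : List (Int × Int × Int)) (k : Int × Int) :
    edges.filter (fun t => pvKeyOf t == k)
      = ((pvEn edges).filter (fun q => pvKeyOf q.2 == k)).map (fun q => q.2) := by
  conv_lhs => rw [← PySem.List.map_snd_enumerate edges 0]
  rw [List.filter_map]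
  rfl

-- a nodup list whose members all equal p, containing p, is [p]
theorem pvSingleton {α : Type} {l : List α} {p : α} (hn : l.Nodup)
    (hp : p ∈ l) (hall : ∀ q ∈ l, q = p) : l = [p] := by
  cases l with
  | nil => cases hp
  | cons x xs =>
    have hx : x = p := hall x (by simp)
    have hxs : xs = [] := by
      cases xs with
      | nil => rfl
      | cons y ys =>
        have hy : y = p := hall y (by simp)
        have := (List.nodup_cons.mp hn).1
        exact absurd (by rw [hx, ← hy]; simp) this
    rw [hx, hxs]

-- membership in B's keep set, in A's terms
theorem pvMemB (edges : List (Int × Int × Int)) (b : Int) :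
    b ∈ pvKeepB edges ↔
      ∃ k, (edges.filter (fun t => pvKeyOf t == k)).map (fun t => t.2.2) = [b] := by
  rw [pvKeepB_eq, PySem.Set.mem_ofList]
  simp only [List.mem_map, List.mem_filter]
  constructor
  · rintro ⟨p, ⟨hp, hu⟩, rfl⟩
    refine ⟨pvKeyOf p.2, ?_⟩
    have hall := (pvUniq_iff edges p hp).mp hu
    have hflt : (pvEn edges).filter (fun q => pvKeyOf q.2 == pvKeyOf p.2) = [p] := by
      refine pvSingleton ((pvEn_nodup edges).filter _) ?_ ?_
      · exact List.mem_filter.mpr ⟨hp, by simp⟩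
      · intro q hq
        rcases List.mem_filter.mp hq with ⟨hq1, hq2⟩
        exact hall q hq1 (by simpa using hq2)
    rw [pvFilter_en edges (pvKeyOf p.2), hflt]
    rfl
  · rintro ⟨k, hk⟩
    rw [pvFilter_en edges k] at hk
    rcases List.length_eq_one_iff.mp (by
        have := congrArg List.length hk; simpa using this) with ⟨q0, hq0⟩
    rw [hq0] at hk
    have hq0mem : q0 ∈ (pvEn edges).filter (fun q => pvKeyOf q.2 == k) := by
      rw [hq0]; simp
    rcases List.mem_filter.mp hq0mem with ⟨hq0en, hq0k⟩
    have hq0k' : pvKeyOf q0.2 = k := by simpa using hq0k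
    refine ⟨q0, ⟨hq0en, ?_⟩, by simpa using hk⟩
    rw [pvUniq_iff edges q0 hq0en]
    intro q hq hkey
    have : q ∈ (pvEn edges).filter (fun r => pvKeyOf r.2 == k) :=
      List.mem_filter.mpr ⟨hq, by simp [hkey, hq0k']⟩
    rw [hq0] at this
    simpa using this

-- ===== VERDICT (by name: the statement is the Claim_ definition above) =====
theorem filter_bridges_spec : Claim_equal_filter_bridges := by
  intro edges bridges _
  unfold Spec_filter_bridges filter_bridges filter_bridges_alt
  refine List.filter_congr (fun b _ => ?_)
  simp only [List.contains_eq_mem, PySem.Set.contains, decide_eq_decide]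
  show b ∈ pvNonRep edges ↔ b ∈ pvKeepB edges
  rw [pvMemA edges b, pvMemB edges b]
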